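-- pv_equiv track=rewrite | github.com/EngOsamaHaikal/active-inacvite-houses | active_inactive_houses.py | stateHouses
-- ===== SOURCE A (Python) =====
-- def stateHouses(states,days):
--     final_states=[0]*len(states)
--
--     while days>0:
--         for i in range(len(states)):
--             if i==0:
--                 a=0^states[i+1]
--             elif i==(len(states)-1):
--                 a=0^states[i-1]
--             else:
--                 a=states[i+1]^states[i-1]
--             final_states[i]=a
--         states=final_states
--         final_states=[0]*len(states)
--         days-=1
--     return states
-- ===== SOURCE B (Python) =====
-- def stateHouses(states, days):
--     def step(s):
--         if not s:
--             return []
--         return [x ^ y for x, y in zip(s[1:] + [0], [0] + s)]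
--
--     s = list(states)
--     snapshot, snap_t, power = s, 0, 1
--     t = 0
--     while t < days:
--         s = step(s)
--         t += 1
--         if s == snapshot:
--             rem = (days - t) % (t - snap_t)
--             for _ in range(rem):
--                 s = step(s)
--             return s
--         if t - snap_t == power:
--             snapshot, snap_t, power = s, t, 2 * power
--     return s
-- ===== Notes on version B (the rewrite author's own statement) =====
-- stated objective: faster
-- what changed: A simulates the neighbour-XOR automaton day by day with a per-index branchy loop for all `days` iterations; B computes each day as one zip of the two shifted lists and runs Brent-style cycle detection (compare against a snapshot refreshed at powers of two), reducing the remaining days modulo the cycle length once the state sequence repeats.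
import Mathlib
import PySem

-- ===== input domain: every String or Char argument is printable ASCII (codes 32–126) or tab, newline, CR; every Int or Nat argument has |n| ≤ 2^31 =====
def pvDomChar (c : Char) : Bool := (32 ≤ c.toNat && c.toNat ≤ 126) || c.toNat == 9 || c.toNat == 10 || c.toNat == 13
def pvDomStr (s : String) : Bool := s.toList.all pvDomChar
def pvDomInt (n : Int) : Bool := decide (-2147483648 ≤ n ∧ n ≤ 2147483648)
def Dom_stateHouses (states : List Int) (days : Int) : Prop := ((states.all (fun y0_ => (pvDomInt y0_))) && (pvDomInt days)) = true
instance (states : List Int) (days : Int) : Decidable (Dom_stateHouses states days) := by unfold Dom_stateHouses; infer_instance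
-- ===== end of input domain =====

-- B replaces A's per-index day-by-day simulation with a zip of the two shifted lists per day plus
-- Brent-style cycle detection: once the state sequence repeats, the remaining days are reduced
-- modulo the cycle length.

-- ===== PORT A =====
-- One day of A's inner for-loop: final_states[i] = a for i in range(len(states)), written into
-- a preallocated [0]*len(states).  Python's plain indexing states[i±1] is ported as getD _ 0:
-- exact whenever the index is in range, which holds on Pre_ (on a singleton list with days > 0
-- the access states[0+1] raises IndexError in Python; Pre_ excludes exactly those inputs).
def stepA (states : List Int) : List Int :=
  (List.range states.length).foldl
    (fun final_states i =>
      final_states.set i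
        (if i = 0 then PySem.Int.bxor 0 (states.getD (i + 1) 0)
         else if i = states.length - 1 then PySem.Int.bxor 0 (states.getD (i - 1) 0)
         else PySem.Int.bxor (states.getD (i + 1) 0) (states.getD (i - 1) 0)))
    (List.replicate states.length 0)

-- while days > 0: states = <one day>; days -= 1
def stateHousesLoop : List Int → Nat → List Int
  | s, 0 => s
  | s, n + 1 => stateHousesLoop (stepA s) n

def stateHouses (states : List Int) (days : Int) : List Int :=
  stateHousesLoop states days.toNat

-- ===== PORT B =====
-- One day of B: [x ^ y for x, y in zip(s[1:] + [0], [0] + s)] (zip truncates the longer list).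
def stepB (s : List Int) : List Int :=
  if s = [] then []
  else List.zipWith PySem.Int.bxor (PySem.List.slice s (some 1) none ++ [0]) (0 :: s)

-- for _ in range(rem): s = step(s)
def iterB : List Int → Nat → List Int
  | s, 0 => s
  | s, n + 1 => iterB (stepB s) n

-- B's while loop: step, then compare with the snapshot (a repeat gives the cycle length
-- t - snap_t, and (days - t) % cyc more steps finish); the snapshot is refreshed whenever
-- t - snap_t reaches the current power of two.  fuel = (days - t).toNat makes the while loop
-- a structural recursion; it does not alter the computation.
def loopB (days : Int) : List Int → List Int → Int → Int → Int → Nat → List Int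
  | s, _snapshot, _snap_t, _t, _power, 0 => s
  | s, snapshot, snap_t, t, power, fuel + 1 =>
    let s' := stepB s
    let t' := t + 1
    if s' = snapshot then
      iterB s' (PySem.Int.mod (days - t') (t' - snap_t)).toNat
    else if t' - snap_t = power then
      loopB days s' s' t' t' (2 * power) fuel
    else
      loopB days s' snapshot snap_t t' power fuel

def stateHouses_alt (states : List Int) (days : Int) : List Int :=
  loopB days states states 0 0 1 days.toNat

-- ===== PRECONDITION & SPEC =====
-- Pre_ excludes exactly the singleton list with days > 0, on which A raises IndexError
-- (it reads states[i+1] at i = 0); B returns [0] there.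
def Pre_stateHouses (states : List Int) (days : Int) : Prop := states.length = 1 → days ≤ 0
instance (states : List Int) (days : Int) : Decidable (Pre_stateHouses states days) := by
  unfold Pre_stateHouses; infer_instance

def pvWitness_stateHouses : List Int × Int := ([3, 1, 4, 1, 5], 7)

def Spec_stateHouses (states : List Int) (days : Int) (out : List Int) : Prop := out = stateHouses_alt states days
instance (states : List Int) (days : Int) (out : List Int) : Decidable (Spec_stateHouses states days out) := by unfold Spec_stateHouses; infer_instance

-- ===== CLAIM (what is proved, stated in full; the proofs are below) =====
def Claim_equal_stateHouses : Prop := ∀ (states : List Int) (days : Int), Dom_stateHouses states days → Pre_stateHouses states days → Spec_stateHouses states days (stateHouses states days)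

-- ===== LEMMAS AND PROOFS =====

-- A's write-into-a-preallocated-list loop computes the map of f over the range.
lemma foldl_set_range (f : Nat → Int) :
    ∀ (n : Nat) (init : List Int), n ≤ init.length →
      (List.range n).foldl (fun fs i => fs.set i (f i)) init
        = (List.range n).map f ++ init.drop n := by
  intro n
  induction n with
  | zero => simp
  | succ n ih =>
    intro init h
    rw [List.range_succ, List.foldl_append, List.map_append]
    rw [ih init (by omega)]
    simp only [List.foldl_cons, List.foldl_nil]
    rw [List.set_append]
    have hlen : ¬ n < (List.map f (List.range n)).length := by simp
    rw [if_neg hlen]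
    have h0 : n - (List.map f (List.range n)).length = 0 := by simp
    rw [h0, List.drop_eq_getElem_cons (by omega : n < init.length), List.set_cons_zero,
       List.append_assoc]
    rfl

lemma length_stepB (s : List Int) : (stepB s).length = s.length := by
  unfold stepB
  by_cases h : s = []
  · simp [h]
  · have : 0 < s.length := List.length_pos_iff.mpr h
    rw [if_neg h]
    simp only [List.length_zipWith]
    rw [(by exact_mod_cast PySem.List.slice_from_natCast s 1 :
         PySem.List.slice s (some 1) none = s.drop 1)]
    simp; omega

-- On lists of length ≠ 1 the two one-day steps agree (the boundary branches of A line up with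
-- the truncation/padding of B's two shifted lists; XOR with 0 commutes).
lemma stepA_eq_stepB (s : List Int) (h : s.length ≠ 1) : stepA s = stepB s := by
  by_cases hnil : s = []
  · subst hnil; rfl
  · have hn : 0 < s.length := List.length_pos_iff.mpr hnil
    unfold stepA
    rw [foldl_set_range _ _ _ (by simp)]
    simp only [List.drop_replicate, Nat.sub_self, List.replicate_zero, List.append_nil]
    apply List.ext_getElem
    · rw [length_stepB]; simp
    · intro i hi1 hi2
      have hi : i < s.length := by simpa using hi1
      have hslice : PySem.List.slice s (some 1) none = s.drop 1 := by
        exact_mod_cast PySem.List.slice_from_natCast s 1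
      simp only [List.getElem_map, List.getElem_range, stepB, if_neg hnil, hslice,
        List.getElem_zipWith]
      by_cases h0 : i = 0
      · subst h0
        have h1 : 0 + 1 < s.length := by omega
        rw [if_pos rfl]
        have : (s.drop 1 ++ [0])[0]'(by simp <;> omega) = s[1]'(by omega) := by
          rw [List.getElem_append_left (by simp <;> omega)]
          simp
        rw [this]
        simp [List.getD, (by omega : 1 < s.length)]
        rw [PySem.Int.bxor_comm]
        exact PySem.Int.bxor_zero _
      · by_cases hl : i = s.length - 1
        · rw [if_neg h0, if_pos hl]
          have e1 : (s.drop 1 ++ [0])[i]'(by simp <;> omega) = 0 := by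
            rw [List.getElem_append_right (by simp <;> omega)]
            simp
          have e2 : (0 :: s)[i]'(by simp <;> omega) = s[i-1]'(by omega) := by
            rcases Nat.exists_eq_succ_of_ne_zero h0 with ⟨j, rfl⟩
            simp
          rw [e1, e2]
          simp [List.getD, (by omega : i - 1 < s.length)]
        · rw [if_neg h0, if_neg hl]
          have e1 : (s.drop 1 ++ [0])[i]'(by simp <;> omega) = s[i+1]'(by omega) := by
            rw [List.getElem_append_left (by simp <;> omega)]
            simp
          have e2 : (0 :: s)[i]'(by simp <;> omega) = s[i-1]'(by omega) := by
            rcases Nat.exists_eq_succ_of_ne_zero h0 with ⟨j, rfl⟩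
            simp
          rw [e1, e2]
          simp [List.getD, (by omega : i + 1 < s.length), (by omega : i - 1 < s.length)]

lemma loopA_eq_iterB (n : Nat) : ∀ s : List Int, s.length ≠ 1 → stateHousesLoop s n = iterB s n := by
  induction n with
  | zero => intro s _; rfl
  | succ n ih =>
    intro s h
    rw [stateHousesLoop, iterB, stepA_eq_stepB s h]
    exact ih _ (by rw [length_stepB]; exact h)

lemma iterB_add (m k : Nat) : ∀ s, iterB s (m + k) = iterB (iterB s m) k := by
  induction m with
  | zero => intro s; rw [Nat.zero_add]; rfl
  | succ m ih =>
    intro s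
    have : m + 1 + k = (m + k) + 1 := by omega
    rw [this, iterB, iterB, ih]

lemma iterB_succ (s : List Int) (t : Nat) : iterB s (t + 1) = stepB (iterB s t) := by
  rw [iterB_add t 1]; rfl

-- Once the orbit repeats (period p from index j), whole multiples of p can be dropped.
lemma iterB_period (s0 : List Int) (j p : Nat) (hp : iterB s0 (j + p) = iterB s0 j) :
    ∀ q r, iterB s0 (j + r + q * p) = iterB s0 (j + r) := by
  intro q
  induction q with
  | zero => intro r; simp
  | succ q ih =>
    intro r
    have h1 : j + r + (q + 1) * p = j + p + (r + q * p) := by ring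
    rw [h1, iterB_add (j + p) (r + q * p), hp, ← iterB_add j (r + q * p)]
    have h3 : j + (r + q * p) = j + r + q * p := by ring
    rw [h3, ih]

-- Invariant of B's while loop: s is the tn-th iterate, the snapshot the stn-th (stn ≤ tn),
-- and tn + fuel = days; whatever power is, the loop returns the days-th iterate.
lemma loopB_eq (d : Nat) (s0 : List Int) :
    ∀ (fuel tn stn : Nat) (power : Int), stn ≤ tn → tn + fuel = d →
      loopB (d : Int) (iterB s0 tn) (iterB s0 stn) (stn : Int) (tn : Int) power fuel
        = iterB s0 d := by
  intro fuel
  induction fuel with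
  | zero => intro tn stn power _ ht; rw [loopB]; rw [(by omega : tn = d)]
  | succ fuel ih =>
    intro tn stn power hst ht
    rw [loopB]
    simp only [← iterB_succ]
    by_cases hEq : iterB s0 (tn + 1) = iterB s0 stn
    · rw [if_pos hEq]
      set p := tn + 1 - stn with hpdef
      have hppos : 0 < p := by omega
      have hcast1 : (tn : Int) + 1 - (stn : Int) = ((p : Nat) : Int) := by omega
      have hcast2 : (d : Int) - ((tn : Int) + 1) = (((d - (tn + 1) : Nat)) : Int) := by omega
      rw [hcast1, hcast2, PySem.Int.mod_natCast, Int.toNat_natCast]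
      rw [← iterB_add (tn + 1) ((d - (tn + 1)) % p)]
      have hper : iterB s0 (stn + p) = iterB s0 stn := by
        rw [(by omega : stn + p = tn + 1), hEq]
      set r := (d - (tn + 1)) % p with hr
      set q := (d - (tn + 1)) / p with hqd
      have hdt : p * q + r = d - (tn + 1) := Nat.div_add_mod (d - (tn + 1)) p
      have hle : tn + 1 ≤ d := by omega
      have h5 : d = (tn + 1) + (p * q + r) := by rw [hdt]; omega
      have e1 : (tn + 1) + r = stn + r + 1 * p := by omega
      have e2 : d = stn + r + (q + 1) * p := by
        rw [h5, (by omega : tn + 1 = stn + p)]; ring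
      rw [e1, iterB_period s0 stn p hper 1 r, e2, iterB_period s0 stn p hper (q + 1) r]
    · rw [if_neg hEq]
      by_cases hPow : (tn : Int) + 1 - (stn : Int) = power
      · rw [if_pos hPow]
        have hc : (tn : Int) + 1 = ((tn + 1 : Nat) : Int) := by omega
        rw [hc]
        exact ih (tn + 1) (tn + 1) (2 * power) (le_refl _) (by omega)
      · rw [if_neg hPow]
        have hc : (tn : Int) + 1 = ((tn + 1 : Nat) : Int) := by omega
        rw [hc]
        exact ih (tn + 1) stn power (by omega) (by omega)

-- ===== VERDICT (by name: the statement is the Claim_ definition above) =====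
theorem stateHouses_spec : Claim_equal_stateHouses := by
  intro states days _hDom hPre
  show stateHouses states days = stateHouses_alt states days
  by_cases hd : days ≤ 0
  · have h0 : days.toNat = 0 := Int.toNat_of_nonpos hd
    unfold stateHouses stateHouses_alt
    rw [h0]; rfl
  · have hlen : states.length ≠ 1 := fun h => absurd (hPre h) hd
    unfold stateHouses stateHouses_alt
    have hdays : ((days.toNat : Nat) : Int) = days := Int.toNat_of_nonneg (by omega)
    rw [← hdays]
    simp only [Int.toNat_natCast]
    rw [loopA_eq_iterB days.toNat states hlen]
    have := loopB_eq days.toNat states days.toNat 0 0 1 (by omega) (by omega)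
    simpa using this.symm
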